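-- pv_equiv track=rewrite | github.com/kondziu/gritty-scripts-of-death | python/concordancer.py | find_concordances
-- ===== SOURCE A (Python) =====
-- def find_concordances(keywords, words, context_size):
-- 	"""	Finds concordances for keywords in a list of input words.
--
-- 	@param keywords - list of keywords,
-- 	@param words - input text as a list of words
-- 	@param context_size - number of words that should surround a keyword
-- 	@return list of concordances"""
--
-- 	# Initialize the concordance map with empty lists, for each keyword.
-- 	concordances = prep_concordance_map(keywords)
--
-- 	# If any word in the text matches a keyword, create a concordance.
-- 	for i in range(0, len(words)):
-- 		for keyword in keywords:
-- 			if matches(keyword, words[i]):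
-- 				concordance = form_concordance(words, i, context_size)
-- 				concordances[keyword].append(concordance)
--
-- 	return concordances
--
-- def prep_concordance_map(dict_words):
-- 	"""	Prepare a map with keywords as keys and empty lists as values.
--
-- 	@param dict_words - list of keywords"""
--
-- 	# Put an empty list value for each keyword as key.
-- 	concordances = {}
-- 	for word in dict_words:
-- 		concordances[word] = []
--
-- 	return concordances
--
-- def matches(word_a, word_b):
-- 	""" Case insensitive string equivalence.
--
-- 	@param word_a - first string
-- 	@param word_b - second string (duh)
-- 	@return True or False"""
--
-- 	return word_a.lower() == word_b.lower()
--
-- def form_concordance(words, occurance, context_size):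
-- 	"""	Creates a concordance.
--
-- 	@param words - list of all input words
-- 	@param occurance - index of keyword in input list
-- 	@param context_size - number of preceding and following words
-- 	@return a sublist of the input words"""
--
-- 	start = occurance - context_size
-- 	if start < 0:
-- 		start = 0
--
-- 	return words[start : occurance + context_size + 1]
-- ===== SOURCE B (Python) =====
-- def find_concordances(keywords, words, context_size):
--     """Same result as A, but keywords are indexed once by their lowercase
--     form, so the pass over the text does one dict lookup per word instead
--     of scanning the whole keyword list, and each word's concordance is
--     sliced once, not once per matching keyword."""
--     concordances = {}
--     index = {}
--     for keyword in keywords: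
--         concordances[keyword] = []
--         index.setdefault(keyword.lower(), []).append(keyword)
--
--     for i, word in enumerate(words):
--         start = i - context_size
--         if start < 0:
--             start = 0
--         concordance = words[start : i + context_size + 1]
--         for keyword in index.get(word.lower(), []):
--             concordances[keyword].append(concordance)
--
--     return concordances
-- ===== Notes on version B (the rewrite author's own statement) =====
-- stated objective: alternative
-- what changed: B builds a dict index from lowercase keyword form to the keywords once and then makes a single pass over the words with one dict lookup per word, instead of A's inner scan of the whole keyword list at every word position.
import Mathlib
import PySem

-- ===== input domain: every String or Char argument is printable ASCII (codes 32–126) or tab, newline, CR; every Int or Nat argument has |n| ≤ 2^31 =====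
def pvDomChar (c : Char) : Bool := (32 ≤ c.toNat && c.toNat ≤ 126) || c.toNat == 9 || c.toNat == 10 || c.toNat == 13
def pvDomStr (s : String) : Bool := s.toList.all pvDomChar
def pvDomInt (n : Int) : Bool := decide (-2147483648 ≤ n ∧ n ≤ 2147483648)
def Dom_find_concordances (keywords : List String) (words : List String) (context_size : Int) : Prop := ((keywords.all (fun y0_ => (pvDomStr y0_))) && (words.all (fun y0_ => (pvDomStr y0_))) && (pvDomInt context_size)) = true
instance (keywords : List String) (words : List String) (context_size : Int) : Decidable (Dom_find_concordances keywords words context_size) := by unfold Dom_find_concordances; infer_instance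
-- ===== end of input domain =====

-- B replaces A's inner scan of the keyword list at every word position by a
-- dict index from lowercase keyword form, built once, followed by a single
-- pass over the words with one lookup per word, slicing each word's
-- concordance once instead of once per matching keyword.

-- ===== PORT A =====
-- matches(word_a, word_b)
def pvMatches (word_a word_b : String) : Bool :=
  PySem.Str.lower word_a == PySem.Str.lower word_b

-- form_concordance(words, occurance, context_size)
def pvFormConcordance (words : List String) (occurance context_size : Int) : List String :=
  let start := occurance - context_size
  let start := if start < 0 then 0 else start
  PySem.List.slice words (some start) (some (occurance + context_size + 1))

-- prep_concordance_map(dict_words)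
def pvPrepConcordanceMap (dict_words : List String) : PySem.Dict String (List (List String)) :=
  dict_words.foldl (fun d word => d.insert word []) PySem.Dict.empty

def find_concordances (keywords : List String) (words : List String) (context_size : Int) :
    List (String × List (List String)) :=
  let concordances := pvPrepConcordanceMap keywords
  ((PySem.List.pyRange 0 (words.length : Int)).foldl
    (fun conc i =>
      keywords.foldl
        (fun conc keyword =>
          if pvMatches keyword (PySem.List.pyGetD words i "") then
            conc.modify keyword [] (fun l => l ++ [pvFormConcordance words i context_size])
          else conc)
        conc)
    concordances).items

-- ===== PORT B =====
def find_concordances_alt (keywords : List String) (words : List String) (context_size : Int) :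
    List (String × List (List String)) :=
  -- first loop of Source B: builds concordances (empty lists) and the lowercase index together
  let init := keywords.foldl
    (fun (p : PySem.Dict String (List (List String)) × PySem.Dict String (List String)) keyword =>
      let lc := PySem.Str.lower keyword
      (p.1.insert keyword [], (p.2.setdefault lc []).modify lc [] (fun l => l ++ [keyword])))
    (PySem.Dict.empty, PySem.Dict.empty)
  -- second loop of Source B: enumerate(words), one index lookup per word
  (words.zipIdx.foldl
    (fun conc p =>
      let start := (p.2 : Int) - context_size
      let start := if start < 0 then 0 else start
      let concordance := PySem.List.slice words (some start) (some ((p.2 : Int) + context_size + 1))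
      (init.2.getD (PySem.Str.lower p.1) []).foldl
        (fun conc keyword => conc.modify keyword [] (fun l => l ++ [concordance]))
        conc)
    init.1).items

-- ===== PRECONDITION & SPEC =====
def Spec_find_concordances (keywords : List String) (words : List String) (context_size : Int) (out : List (String × List (List String))) : Prop := out = find_concordances_alt keywords words context_size
instance (keywords : List String) (words : List String) (context_size : Int) (out : List (String × List (List String))) : Decidable (Spec_find_concordances keywords words context_size out) := by unfold Spec_find_concordances; infer_instance

-- ===== CLAIM (what is proved, stated in full; the proofs are below) =====
def Claim_equal_find_concordances : Prop := ∀ (keywords : List String) (words : List String) (context_size : Int), Dom_find_concordances keywords words context_size → Spec_find_concordances keywords words context_size (find_concordances keywords words context_size)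

-- ===== LEMMAS AND PROOFS =====

-- B's single initialisation loop splits into the two independent folds.
theorem pvPairFold (keywords : List String)
    (d : PySem.Dict String (List (List String))) (e : PySem.Dict String (List String)) :
    keywords.foldl
      (fun (p : PySem.Dict String (List (List String)) × PySem.Dict String (List String)) keyword =>
        (p.1.insert keyword [],
         (p.2.setdefault (PySem.Str.lower keyword) []).modify (PySem.Str.lower keyword) [] (fun l => l ++ [keyword])))
      (d, e)
    = (keywords.foldl (fun d word => d.insert word []) d,
       keywords.foldl (fun e kw => (e.setdefault (PySem.Str.lower kw) []).modify (PySem.Str.lower kw) [] (fun l => l ++ [kw])) e) := by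
  induction keywords generalizing d e with
  | nil => rfl
  | cons k ks ih =>
      simpa using ih (d.insert k [])
        ((e.setdefault (PySem.Str.lower k) []).modify (PySem.Str.lower k) [] (fun l => l ++ [k]))

-- The index groups the keywords by lowercase form, in keyword order.
theorem pvIndexGetD (keywords : List String) (e : PySem.Dict String (List String)) (lc : String) :
    (keywords.foldl (fun e kw => (e.setdefault (PySem.Str.lower kw) []).modify (PySem.Str.lower kw) [] (fun l => l ++ [kw])) e).getD lc []
    = e.getD lc [] ++ keywords.filter (fun kw => PySem.Str.lower kw == lc) := by
  induction keywords generalizing e with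
  | nil => simp
  | cons k ks ih =>
      simp only [List.foldl_cons, List.filter_cons, ih]
      rw [PySem.Dict.modify, PySem.Dict.getD_insert]
      by_cases h : lc = PySem.Str.lower k
      · simp [h, PySem.Dict.getD_setdefault_self]
      · have h' : ¬ PySem.Str.lower k = lc := fun hh => h hh.symm
        simp [h, h', PySem.Dict.getD, PySem.Dict.get?_setdefault_of_ne]

-- A's loop over range(len(words)) reading words[i] is the fold over enumerate(words).
theorem pvRangeFold {α β : Type} (xs : List α) (d : α) (F : β → Int → α → β) (init : β) :
    (PySem.List.pyRange 0 (xs.length : Int)).foldl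
      (fun a j => F a j (PySem.List.pyGetD xs j d)) init
    = xs.zipIdx.foldl (fun a p => F a (p.2 : Int) p.1) init := by
  induction xs using List.reverseRecOn generalizing init with
  | nil => simp [PySem.List.pyRange]
  | append_singleton xs x ih =>
      have hlen : ((xs ++ [x]).length : Int) = (xs.length : Int) + 1 := by simp
      have hcong : List.foldl (fun a j => F a j (PySem.List.pyGetD (xs ++ [x]) j d)) init
            (PySem.List.pyRange 0 (xs.length : Int))
          = List.foldl (fun a j => F a j (PySem.List.pyGetD xs j d)) init
            (PySem.List.pyRange 0 (xs.length : Int)) := by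
        apply PySem.List.foldl_congr_mem
        intro acc j hj
        rcases (PySem.List.mem_pyRange_one).1 hj with ⟨h0, h1⟩
        obtain ⟨n, rfl⟩ : ∃ n : Nat, j = (n : Int) := ⟨j.toNat, (Int.toNat_of_nonneg h0).symm⟩
        have hn : n < xs.length := by exact_mod_cast h1
        simp [PySem.List.pyGetD_natCast, List.getD, List.getElem?_append_left hn]
      rw [hlen, PySem.List.pyRange_one_succ_right (by positivity), List.foldl_append, hcong, ih,
        List.zipIdx_append, List.foldl_append]
      simp [PySem.List.pyGetD_natCast, List.getD, List.zipIdx]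

-- ===== VERDICT (by name: the statement is the Claim_ definition above) =====
theorem find_concordances_spec : Claim_equal_find_concordances := by
  intro keywords words context_size _
  show find_concordances keywords words context_size = find_concordances_alt keywords words context_size
  simp only [find_concordances, find_concordances_alt, pvPrepConcordanceMap, pvPairFold]
  have hR := pvRangeFold (β := PySem.Dict String (List (List String))) words ""
    (fun a j w =>
      keywords.foldl
        (fun conc keyword =>
          if pvMatches keyword w then
            conc.modify keyword [] (fun l => l ++ [pvFormConcordance words j context_size])
          else conc) a)
    (keywords.foldl (fun d word => d.insert word []) PySem.Dict.empty)
  beta_reduce at hR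
  rw [hR]
  congr 1
  apply PySem.List.foldl_congr_mem
  intro acc p _
  rw [pvIndexGetD]
  have hempty : (PySem.Dict.empty : PySem.Dict String (List String)).getD (PySem.Str.lower p.1) [] = [] := rfl
  rw [hempty, List.nil_append, List.foldl_filter]
  simp [pvMatches, pvFormConcordance]
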